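-- pv_equiv track=rewrite | github.com/RoboticsLabURJC/2023-tfg-adrian-madinabeitia | src/drone_driver/src/3dplot.py | getLabelDistribution
-- ===== SOURCE A (Python) =====
-- def getLabelDistribution(labels):
--     positiveAngVels = [0, 0, 0]
--     negativeAngVels = [0, 0, 0]
--
--     # Counts the number of labels of each type
--     for label in labels:
--
--         if label == 3:
--             positiveAngVels[2] += 1
--
--         elif label == 2:
--             positiveAngVels[1] += 1
--
--         elif label == 1:
--             positiveAngVels[0] += 1
--
--         elif label == -3:
--             negativeAngVels[2] += 1
--
--         elif label == -2:
--             negativeAngVels[1] += 1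
--
--         else:
--             negativeAngVels[0] += 1
--
--
--     return positiveAngVels, negativeAngVels
-- ===== SOURCE B (Python) =====
-- def getLabelDistribution(labels):
--     # Tally per target value with count scans; the catch-all bin is derived by
--     # subtraction from the total instead of an else branch per element.
--     c1 = labels.count(1)
--     c2 = labels.count(2)
--     c3 = labels.count(3)
--     cm2 = labels.count(-2)
--     cm3 = labels.count(-3)
--     positiveAngVels = [c1, c2, c3]
--     negativeAngVels = [len(labels) - c1 - c2 - c3 - cm2 - cm3, cm2, cm3]
--     return positiveAngVels, negativeAngVels
-- ===== Notes on version B (the rewrite author's own statement) =====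
-- stated objective: simpler
-- what changed: Replaces the per-element if/elif branch loop with per-value count tallies, deriving the catch-all bin by subtracting the five enumerated counts from the total length.
import Mathlib
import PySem

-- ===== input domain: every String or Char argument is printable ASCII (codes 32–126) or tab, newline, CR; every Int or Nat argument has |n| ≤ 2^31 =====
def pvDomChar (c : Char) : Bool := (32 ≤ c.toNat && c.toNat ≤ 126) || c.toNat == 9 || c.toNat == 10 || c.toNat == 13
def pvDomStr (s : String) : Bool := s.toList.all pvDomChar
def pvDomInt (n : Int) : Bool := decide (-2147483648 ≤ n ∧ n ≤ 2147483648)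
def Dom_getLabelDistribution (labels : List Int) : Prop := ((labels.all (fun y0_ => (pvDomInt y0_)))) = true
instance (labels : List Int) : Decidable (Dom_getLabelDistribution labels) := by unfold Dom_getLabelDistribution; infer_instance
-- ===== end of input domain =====

-- B replaces A's per-element if/elif loop by per-value count tallies, with the
-- catch-all bin derived by subtraction from the total (objective: simpler).

-- ===== PORT A =====
-- one step of A's loop body: the in-place += on the two 3-element lists
def getLabelDistributionStep (st : List Int × List Int) (label : Int) : List Int × List Int :=
  if label == 3 then (st.1.set 2 (st.1.getD 2 0 + 1), st.2)
  else if label == 2 then (st.1.set 1 (st.1.getD 1 0 + 1), st.2)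
  else if label == 1 then (st.1.set 0 (st.1.getD 0 0 + 1), st.2)
  else if label == -3 then (st.1, st.2.set 2 (st.2.getD 2 0 + 1))
  else if label == -2 then (st.1, st.2.set 1 (st.2.getD 1 0 + 1))
  else (st.1, st.2.set 0 (st.2.getD 0 0 + 1))

def getLabelDistribution (labels : List Int) : List Int × List Int :=
  labels.foldl getLabelDistributionStep (([0, 0, 0] : List Int), ([0, 0, 0] : List Int))

-- ===== PORT B =====
def getLabelDistribution_alt (labels : List Int) : List Int × List Int :=
  let c1 : Int := PySem.List.count labels 1
  let c2 : Int := PySem.List.count labels 2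
  let c3 : Int := PySem.List.count labels 3
  let cm2 : Int := PySem.List.count labels (-2)
  let cm3 : Int := PySem.List.count labels (-3)
  ([c1, c2, c3], [(labels.length : Int) - c1 - c2 - c3 - cm2 - cm3, cm2, cm3])

-- ===== PRECONDITION & SPEC =====
def Spec_getLabelDistribution (labels : List Int) (out : List Int × List Int) : Prop := out = getLabelDistribution_alt labels
instance (labels : List Int) (out : List Int × List Int) : Decidable (Spec_getLabelDistribution labels out) := by unfold Spec_getLabelDistribution; infer_instance

-- ===== CLAIM (what is proved, stated in full; the proofs are below) =====
def Claim_equal_getLabelDistribution : Prop := ∀ (labels : List Int), Dom_getLabelDistribution labels → Spec_getLabelDistribution labels (getLabelDistribution labels)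

-- ===== LEMMAS AND PROOFS =====
theorem getLabelDistribution_foldl (labels : List Int) (a b c d e f : Int) :
    labels.foldl getLabelDistributionStep ([a, b, c], [d, e, f]) =
      ([a + PySem.List.count labels 1, b + PySem.List.count labels 2, c + PySem.List.count labels 3],
       [d + ((labels.length : Int) - PySem.List.count labels 1 - PySem.List.count labels 2 -
              PySem.List.count labels 3 - PySem.List.count labels (-2) - PySem.List.count labels (-3)),
        e + PySem.List.count labels (-2), f + PySem.List.count labels (-3)]) := by
  induction labels generalizing a b c d e f with
  | nil => simp [PySem.List.count]
  | cons x xs ih =>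
    simp only [List.foldl_cons, getLabelDistributionStep, PySem.List.count, List.count_cons]
    by_cases h3 : x = 3
    · subst h3; simp [ih]; omega
    · by_cases h2 : x = 2
      · subst h2; simp [ih]; omega
      · by_cases h1 : x = 1
        · subst h1; simp [ih]; omega
        · by_cases hm3 : x = -3
          · subst hm3; simp [ih]; omega
          · by_cases hm2 : x = -2
            · subst hm2; simp [ih]; omega
            · simp [h3, h2, h1, hm3, hm2, ih]; omega

-- ===== VERDICT (by name: the statement is the Claim_ definition above) =====
theorem getLabelDistribution_spec : Claim_equal_getLabelDistribution := by
  intro labels _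
  show getLabelDistribution labels = getLabelDistribution_alt labels
  simp [getLabelDistribution, getLabelDistribution_alt, getLabelDistribution_foldl]
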